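-- pv_equiv track=rewrite | github.com/pypi-data/pypi-mirror-16 | packages/aws-vapor/aws-vapor-0.0.2.tar.gz/aws-vapor-0.0.2/aws_vapor/utils.py | _replace_params
-- ===== SOURCE A (Python) =====
-- def _replace_params(line, params):
--     for k, v in params.items():
--         key = '{{ %s }}' % k
--         if line.find(key) != -1:
--             pos = line.index(key)
--             l_line = line[:pos]
--             r_line = line[pos + len(key):]
--             return _replace_params(l_line, params) + [v] + _replace_params(r_line, params)
--     return [line]
-- ===== SOURCE B (Python) =====
-- def _replace_params(line, params):
--     # Iterative re-implementation: explicit stack of tagged tasks instead of recursion.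
--     result = []
--     stack = [('line', line)]
--     while stack:
--         tag, s = stack.pop()
--         if tag == 'value':
--             result.append(s)
--             continue
--         hit = next((('{{ %s }}' % k, v) for k, v in params.items() if ('{{ %s }}' % k) in s), None)
--         if hit is None:
--             result.append(s)
--         else:
--             key, v = hit
--             pos = s.find(key)
--             # push in reverse so the left piece is processed first
--             stack.append(('line', s[pos + len(key):]))
--             stack.append(('value', v))
--             stack.append(('line', s[:pos]))
--     return result
-- ===== Notes on version B (the rewrite author's own statement) =====
-- stated objective: alternative
-- what changed: Replaces A's recursion by an iterative loop over an explicit stack of tagged ('line'/'value') tasks that accumulates the result list left to right; inserted values are tagged so they are never rescanned.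
import Mathlib
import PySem

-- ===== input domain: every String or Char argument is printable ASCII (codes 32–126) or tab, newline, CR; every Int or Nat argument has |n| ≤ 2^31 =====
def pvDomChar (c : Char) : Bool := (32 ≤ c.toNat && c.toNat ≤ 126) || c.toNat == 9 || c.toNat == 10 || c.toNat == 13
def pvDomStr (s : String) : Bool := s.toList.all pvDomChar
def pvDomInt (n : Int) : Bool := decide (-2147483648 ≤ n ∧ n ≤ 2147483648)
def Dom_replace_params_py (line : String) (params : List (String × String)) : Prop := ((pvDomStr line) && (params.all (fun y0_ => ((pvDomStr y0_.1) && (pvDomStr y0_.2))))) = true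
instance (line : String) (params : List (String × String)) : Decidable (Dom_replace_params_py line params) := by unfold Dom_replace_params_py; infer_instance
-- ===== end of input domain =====

-- B replaces A's recursion by an iterative loop over an explicit stack of tagged tasks (objective: alternative decomposition, same cost).

-- key = '{{ %s }}' % k (shared literal-building helper)
def pvKeyOf (k : String) : List Char := '{' :: '{' :: ' ' :: (k.toList ++ [' ', '}', '}'])

-- ===== PORT A =====
-- A's for-loop over params.items(): first (k, v) with line.find(key) != -1, together with
-- pos = line.index(key) (key is present, so .index = .find, which is exact here) and len(key).
def pvFindKeyA (line : List Char) : List (String × String) → Option (Nat × Nat × String)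
  | [] => none
  | (k, v) :: rest =>
    let key := pvKeyOf k
    if PySem.Chars.find line key ≠ -1 then
      some ((PySem.Chars.find line key).toNat, key.length, v)
    else pvFindKeyA line rest

-- termination fact for the port's recursion (cited by decreasing_by)
lemma pvFindKeyA_bounds (line : List Char) (params : List (String × String)) (pos klen : Nat)
    (v : String) (h : pvFindKeyA line params = some (pos, klen, v)) :
    pos + klen ≤ line.length ∧ 0 < klen := by
  induction params with
  | nil => simp [pvFindKeyA] at h
  | cons p rest ih =>
    obtain ⟨k, v'⟩ := p
    simp only [pvFindKeyA] at h
    split at h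
    · rename_i hne
      injection h with h1
      injection h1 with hpos h2
      injection h2 with hklen hv
      subst hpos; subst hklen
      have hnn : 0 ≤ PySem.Chars.find line (pvKeyOf k) := by
        have := PySem.Chars.neg_one_le_find line (pvKeyOf k)
        omega
      have hsp := (PySem.Chars.find_spec (s := line) (sub := pvKeyOf k) hnn).1
      have hle := hsp.length_le
      simp only [List.length_drop] at hle
      have hk : 0 < (pvKeyOf k).length := by simp [pvKeyOf]
      constructor
      · omega
      · exact hk
    · exact ih h

def pvReplaceA (line : List Char) (params : List (String × String)) : List String :=
  match h : pvFindKeyA line params with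
  | none => [String.ofList line]
  | some (pos, klen, v) =>
      pvReplaceA (line.take pos) params ++ [v] ++ pvReplaceA (line.drop (pos + klen)) params
termination_by line.length
decreasing_by
  · have := pvFindKeyA_bounds line params pos klen v h
    simp only [List.length_take]
    omega
  · have := pvFindKeyA_bounds line params pos klen v h
    simp only [List.length_drop]
    omega

def replace_params_py (line : String) (params : List (String × String)) : List String :=
  pvReplaceA line.toList params

-- ===== PORT B =====
-- Source B's tagged tasks ('line', s) / ('value', v)
inductive PvTask where
  | line (s : List Char)
  | val (v : String)

-- Source B's `next((… for k, v in params.items() if key in s), None)` followed by s.find(key):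
-- first (k, v) whose key occurs in s, returned with the find position and len(key).
def pvFindKeyB (s : List Char) : List (String × String) → Option (Nat × Nat × String)
  | [] => none
  | (k, v) :: rest =>
    let key := pvKeyOf k
    if PySem.Chars.isIn key s then some ((PySem.Chars.find s key).toNat, key.length, v)
    else pvFindKeyB s rest

def pvTaskW : PvTask → Nat
  | .line s => 3 * s.length + 1
  | .val _ => 1

def pvStackMeasure (st : List PvTask) : Nat := (st.map pvTaskW).sum

-- termination fact for the loop (cited by decreasing_by)
lemma pvFindKeyB_bounds (s : List Char) (params : List (String × String)) (pos klen : Nat)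
    (v : String) (h : pvFindKeyB s params = some (pos, klen, v)) :
    pos + klen ≤ s.length ∧ 0 < klen := by
  induction params with
  | nil => simp [pvFindKeyB] at h
  | cons p rest ih =>
    obtain ⟨k, v'⟩ := p
    simp only [pvFindKeyB] at h
    split at h
    · rename_i hin
      injection h with h1
      injection h1 with hpos h2
      injection h2 with hklen hv
      subst hpos; subst hklen
      have hne : PySem.Chars.find s (pvKeyOf k) ≠ -1 :=
        (PySem.Chars.find_ne_neg_one_iff s (pvKeyOf k)).mpr
          ((PySem.Chars.isIn_iff_infix (pvKeyOf k) s).mp hin)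
      have hnn : 0 ≤ PySem.Chars.find s (pvKeyOf k) := by
        have := PySem.Chars.neg_one_le_find s (pvKeyOf k)
        omega
      have hsp := (PySem.Chars.find_spec (s := s) (sub := pvKeyOf k) hnn).1
      have hle := hsp.length_le
      simp only [List.length_drop] at hle
      have hk : 0 < (pvKeyOf k).length := by simp [pvKeyOf]
      constructor
      · omega
      · exact hk
    · exact ih h

-- Source B's while-loop: pop the top task; a value is appended to the result, a line is either
-- split (pushing right line, value, left line, so the left is processed first) or appended.
def pvRunB (params : List (String × String)) : List PvTask → List String → List String
  | [], res => res
  | .val v :: rest, res => pvRunB params rest (res ++ [v])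
  | .line s :: rest, res =>
    match h : pvFindKeyB s params with
    | none => pvRunB params rest (res ++ [String.ofList s])
    | some (pos, klen, v) =>
        pvRunB params (.line (s.take pos) :: .val v :: .line (s.drop (pos + klen)) :: rest) res
termination_by st => pvStackMeasure st
decreasing_by
  all_goals simp [pvStackMeasure, pvTaskW]
  all_goals
    have := pvFindKeyB_bounds _ _ _ _ _ h
    omega

def replace_params_py_alt (line : String) (params : List (String × String)) : List String :=
  pvRunB params [.line line.toList] []

-- ===== PRECONDITION & SPEC =====
def Spec_replace_params_py (line : String) (params : List (String × String)) (out : List String) : Prop := out = replace_params_py_alt line params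
instance (line : String) (params : List (String × String)) (out : List String) : Decidable (Spec_replace_params_py line params out) := by unfold Spec_replace_params_py; infer_instance

-- ===== CLAIM (what is proved, stated in full; the proofs are below) =====
def Claim_equal_replace_params_py : Prop := ∀ (line : String) (params : List (String × String)), Dom_replace_params_py line params → Spec_replace_params_py line params (replace_params_py line params)

-- ===== LEMMAS AND PROOFS =====

lemma pvFindKey_eq (s : List Char) (params : List (String × String)) :
    pvFindKeyB s params = pvFindKeyA s params := by
  induction params with
  | nil => rfl
  | cons p rest ih =>
    obtain ⟨k, v⟩ := p
    simp only [pvFindKeyA, pvFindKeyB]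
    have : PySem.Chars.isIn (pvKeyOf k) s = true ↔ PySem.Chars.find s (pvKeyOf k) ≠ -1 := by
      rw [PySem.Chars.isIn_iff_infix, PySem.Chars.find_ne_neg_one_iff]
    by_cases hc : PySem.Chars.isIn (pvKeyOf k) s = true
    · rw [if_pos hc, if_pos (this.mp hc)]
    · rw [if_neg hc, if_neg (fun hn => hc (this.mpr hn)), ih]

-- what a task contributes to the final result
def pvEvalTask (params : List (String × String)) : PvTask → List String
  | .line s => pvReplaceA s params
  | .val v => [v]

theorem pvRunB_eval (params : List (String × String)) (st : List PvTask) (res : List String) :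
    pvRunB params st res = res ++ (st.map (pvEvalTask params)).flatten := by
  match st with
  | [] => simp [pvRunB]
  | .val v :: rest =>
    rw [pvRunB, pvRunB_eval params rest (res ++ [v])]
    simp [pvEvalTask]
  | .line s :: rest =>
    rw [pvRunB]
    split
    · rename_i h
      rw [pvRunB_eval params rest _]
      rw [pvFindKey_eq] at h
      simp only [List.map_cons, pvEvalTask]
      rw [pvReplaceA.eq_def, h]
      simp
    · rename_i pos klen v h
      rw [pvRunB_eval params (.line (s.take pos) :: .val v :: .line (s.drop (pos + klen)) :: rest) res]
      rw [pvFindKey_eq] at h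
      simp only [List.map_cons, pvEvalTask]
      conv_rhs => rw [pvReplaceA.eq_def, h]
      simp
termination_by pvStackMeasure st
decreasing_by
  all_goals simp [pvStackMeasure, pvTaskW]
  all_goals
    rename_i heq
    have := pvFindKeyB_bounds _ _ _ _ _ heq
    omega

-- ===== VERDICT (by name: the statement is the Claim_ definition above) =====
theorem replace_params_py_spec : Claim_equal_replace_params_py := by
  intro line params _
  unfold Spec_replace_params_py replace_params_py replace_params_py_alt
  rw [pvRunB_eval]
  simp [pvEvalTask]
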